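-- pv_equiv track=rewrite | github.com/anhvurz90/algo | kattisP/src/com/anhvurz90/algo/kattis/Ignore.py | reverse2
-- ===== SOURCE A (Python) =====
-- rev2 = [0,1,2,-1,-1,5,9,-1,8,6];
--
-- def reverseSt(num):
--     r =  str(num)[::-1];
--     ret= "";
--     for c in r:
--         if (rev2[int(c)] == -1):
--             return "";
--         ret+= str(rev2[int(c)]);
--     return ret;
--
-- def ok(num):
--     return len(num) > 0;
--
-- def reverse2(k):
--     count = 0;
--     current = 0;
--     while (count < k):
--         current += 1;
--         r = reverseSt(current);
--         if (ok(r)):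
--             count+= 1;
--         if (count == k):
--             return r;
--     return "";
-- ===== SOURCE B (Python) =====
-- # k-th number whose decimal digits all lie in {0,1,2,5,6,8,9}, returned as the
-- # rev2-mapped reverse of its decimal string. The 7 allowed digits make these
-- # numbers order-isomorphic to base-7 numerals, so the answer is read off from
-- # the base-7 digits of k directly: _MAP[d] = str(rev2[[0,1,2,5,6,8,9][d]]).
-- _MAP = "0125986"
--
-- def reverse2(k):
--     out = []
--     while k > 0:
--         out.append(_MAP[k % 7])
--         k //= 7
--     return ''.join(out)
-- ===== Notes on version B (the rewrite author's own statement) =====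
-- stated objective: faster
-- what changed: A scans every integer upward, string-reversing and digit-mapping each one to test whether its digits avoid 3/4/7 until the k-th hit; B exploits that the numbers with digits in the 7-element set {0,1,2,5,6,8,9} are order-isomorphic to base-7 numerals, so it emits the answer directly from the base-7 digits of k via a lookup string.
import Mathlib
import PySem

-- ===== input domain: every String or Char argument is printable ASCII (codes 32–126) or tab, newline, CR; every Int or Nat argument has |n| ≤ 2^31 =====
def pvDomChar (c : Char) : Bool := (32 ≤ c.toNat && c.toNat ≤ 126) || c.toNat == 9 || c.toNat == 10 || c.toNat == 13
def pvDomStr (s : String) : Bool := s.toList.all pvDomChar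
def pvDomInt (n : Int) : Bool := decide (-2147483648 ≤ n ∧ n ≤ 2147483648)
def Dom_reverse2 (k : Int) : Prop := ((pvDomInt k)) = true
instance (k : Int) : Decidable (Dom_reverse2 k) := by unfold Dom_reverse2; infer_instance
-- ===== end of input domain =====

-- B replaces A's scan-and-test over all integers by reading the answer off the base-7
-- digits of k (the allowed-digit numbers are order-isomorphic to base-7 numerals): faster.

-- ===== PORT A =====
def rev2L : List Int := [0, 1, 2, -1, -1, 5, 9, -1, 8, 6]

-- for c in r: if rev2[int(c)] == -1: return ""; ret += str(rev2[int(c)])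
def reverseStGo : List Char → String → String
  | [], ret => ret
  | c :: rest, ret =>
    match PySem.Int.ofChars? [c] with
    | none => ""          -- int(c) would raise ValueError; unreachable: c is a decimal digit
    | some i =>
      match PySem.List.pyGet? rev2L i with
      | none => ""        -- IndexError; unreachable: 0 ≤ int(c) ≤ 9
      | some v => if v = -1 then "" else reverseStGo rest (ret ++ PySem.Int.toStr v)

def reverseSt (num : Int) : String :=
  match PySem.Str.slice? (PySem.Int.toStr num) none none (-1) with
  | none => ""            -- a slice with step -1 never raises
  | some r => reverseStGo r.toList ""

def okA (num : String) : Bool := decide (0 < PySem.Str.len num)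

-- while count < k: current += 1; r = reverseSt(current); if ok(r): count += 1;
--                  if count == k: return r
-- fuel guard only (the loop runs `current` up to the k-th allowed-digit number, which is
-- < 10^12 for |k| ≤ 2^31 as proved below); the body is the transliterated Python.
def reverse2Go : Nat → Int → Int → Int → String
  | 0, _, _, _ => ""
  | fuel+1, k, count, current =>
    if count < k then
      let current' := current + 1
      let r := reverseSt current'
      let count' := if okA r then count + 1 else count
      if count' = k then r else reverse2Go fuel k count' current'
    else ""

def reverse2 (k : Int) : String := reverse2Go 1000000000000 k 0 0

-- ===== PORT B =====
def pvMapB : String := "0125986"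

-- while k > 0: out.append(_MAP[k % 7]); k //= 7
def reverse2AltGo (k : Int) : List String :=
  if 0 < k then
    (match PySem.Str.pyGet? pvMapB (PySem.Int.mod k 7) with
     | some c => String.ofList [c]
     | none => "") :: reverse2AltGo (PySem.Int.floordiv k 7)   -- index is 0..6: never none
  else []
termination_by k.toNat
decreasing_by
  simp only [PySem.Int.floordiv, Int.fdiv_eq_ediv]
  omega

def reverse2_alt (k : Int) : String := PySem.Str.join "" (reverse2AltGo k)

-- ===== PRECONDITION & SPEC =====
def Spec_reverse2 (k : Int) (out : String) : Prop := out = reverse2_alt k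
instance (k : Int) (out : String) : Decidable (Spec_reverse2 k out) := by unfold Spec_reverse2; infer_instance

-- ===== CLAIM (what is proved, stated in full; the proofs are below) =====
def Claim_equal_reverse2 : Prop := ∀ (k : Int), Dom_reverse2 k → Spec_reverse2 k (reverse2 k)

-- ===== LEMMAS AND PROOFS =====

-- the 7 decimal digits d with rev2[d] ≠ -1, in increasing order
def allowedDigits : List ℕ := [0, 1, 2, 5, 6, 8, 9]
-- base-7 digit → allowed decimal digit
def Df (d : ℕ) : ℕ := allowedDigits.getD d 0
-- base-7 digit → rev2-mapped allowed digit (= rvN ∘ Df)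
def Mf (d : ℕ) : ℕ := [0, 1, 2, 5, 9, 8, 6].getD d 0
-- rev2 as a ℕ map on the allowed digits
def rvN (d : ℕ) : ℕ := [0, 1, 2, 0, 0, 5, 9, 0, 8, 6].getD d 0
-- the k-th positive integer all of whose decimal digits are allowed
def gN (k : ℕ) : ℕ := Nat.ofDigits 10 ((Nat.digits 7 k).map Df)
-- inverse of Df on the allowed digits
def DfInv (d : ℕ) : ℕ := [0, 1, 2, 0, 0, 3, 4, 0, 5, 6].getD d 0
def hN (n : ℕ) : ℕ := Nat.ofDigits 7 ((Nat.digits 10 n).map DfInv)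
def goodN (n : ℕ) : Prop := ∀ d ∈ Nat.digits 10 n, d ∈ allowedDigits

lemma gN_zero : gN 0 = 0 := by simp [gN]

lemma gN_rec (k : ℕ) (hk : k ≠ 0) : gN k = Df (k % 7) + 10 * gN (k / 7) := by
  rw [gN, Nat.digits_def' (by norm_num : (1:ℕ) < 7) (Nat.pos_of_ne_zero hk)]
  simp [Nat.ofDigits_cons, gN]

lemma Df_ge (d : ℕ) (h : d < 7) : d ≤ Df d := by interval_cases d <;> decide

lemma le_gN (k : ℕ) : k ≤ gN k := by
  induction k using Nat.strong_induction_on with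
  | _ k ih =>
    rcases Nat.eq_zero_or_pos k with h | h
    · simp [h, gN]
    · have h7 : k % 7 < 7 := Nat.mod_lt _ (by norm_num)
      have hd := Df_ge _ h7
      have hq : k / 7 < k := Nat.div_lt_self h (by norm_num)
      have := ih (k / 7) hq
      rw [gN_rec k (Nat.pos_iff_ne_zero.mp h)]
      omega

lemma gN_lt_succ (k : ℕ) : gN k < gN (k + 1) := by
  induction k using Nat.strong_induction_on with
  | _ k ih =>
    rcases Nat.eq_zero_or_pos k with h | h
    · subst h; decide
    · have hrec := gN_rec k (by omega)
      have hrec1 := gN_rec (k+1) (by omega)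
      rcases Nat.eq_zero_or_pos ((k+1) % 7) with ha | ha
      · -- k+1 = 7q: compare 9 + 10·gN(q-1) with 10·gN q
        have hq : (k+1) / 7 ≥ 1 := by omega
        have hk6 : k % 7 = 6 := by omega
        have hkd : k / 7 = (k+1)/7 - 1 := by omega
        have hlt : (k+1)/7 - 1 < k := by omega
        have := ih _ hlt
        have heq : ((k+1)/7 - 1) + 1 = (k+1)/7 := by omega
        rw [heq] at this
        rw [hrec, hrec1, ha, hk6, hkd]
        simp [Df, allowedDigits]
        omega
      · have h1 : (k+1) % 7 = k % 7 + 1 := by omega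
        have h2 : (k+1) / 7 = k / 7 := by omega
        have : Df (k % 7) < Df (k % 7 + 1) := by
          have : k % 7 < 6 := by omega
          interval_cases h : (k % 7) <;> decide
        rw [hrec, hrec1, h1, h2]
        omega

lemma gN_mono : StrictMono gN := strictMono_nat_of_lt_succ gN_lt_succ

lemma digits_gN (k : ℕ) (hk : k ≠ 0) :
    Nat.digits 10 (gN k) = (Nat.digits 7 k).map Df := by
  apply Nat.digits_ofDigits 10 (by norm_num)
  · intro l hl
    obtain ⟨d, hd, rfl⟩ := List.mem_map.mp hl
    have : d < 7 := Nat.digits_lt_base (by norm_num) hd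
    interval_cases d <;> decide
  · intro h
    rw [List.getLast_map]
    have hne : Nat.digits 7 k ≠ [] := Nat.digits_ne_nil_iff_ne_zero.mpr hk
    have hlast := Nat.getLast_digit_ne_zero 7 hk
    have hlt : (Nat.digits 7 k).getLast hne < 7 :=
      Nat.digits_lt_base (by norm_num) (List.getLast_mem hne)
    generalize hx : (Nat.digits 7 k).getLast hne = x at *
    interval_cases x <;> simp_all <;> decide

lemma good_gN (k : ℕ) (hk : k ≠ 0) : goodN (gN k) := by
  intro d hd
  rw [digits_gN k hk] at hd
  obtain ⟨e, he, rfl⟩ := List.mem_map.mp hd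
  have : e < 7 := Nat.digits_lt_base (by norm_num) he
  interval_cases e <;> decide

lemma gN_hN (n : ℕ) (hg : goodN n) : gN (hN n) = n := by
  induction n using Nat.strong_induction_on with
  | _ n ih =>
    rcases Nat.eq_zero_or_pos n with h | h
    · subst h; decide
    · have hdig : Nat.digits 10 n = n % 10 :: Nat.digits 10 (n / 10) :=
        Nat.digits_def' (by norm_num) h
      have hmem : n % 10 ∈ allowedDigits := hg _ (by rw [hdig]; exact List.mem_cons_self ..)
      have hgq : goodN (n / 10) := by
        intro d hd; exact hg d (by rw [hdig]; exact List.mem_cons_of_mem _ hd)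
      have hrec : hN n = DfInv (n % 10) + 7 * hN (n / 10) := by
        rw [hN, hdig]; simp [Nat.ofDigits_cons, hN]
      have hinv : ∀ a ∈ allowedDigits, DfInv a < 7 ∧ Df (DfInv a) = a := by decide
      obtain ⟨hinv7, hDDf⟩ := hinv _ hmem
      have hq := ih (n / 10) (Nat.div_lt_self h (by norm_num)) hgq
      rcases Nat.eq_zero_or_pos (hN n) with hz | hz
      · -- then both summands are zero, so n = 0, contradiction
        have h1 : DfInv (n % 10) = 0 := by omega
        have h2 : hN (n / 10) = 0 := by omega
        rw [h2] at hq
        have : gN 0 = 0 := by decide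
        rw [this] at hq
        have hn0 : n % 10 = 0 := by
          have : ∀ a ∈ allowedDigits, DfInv a = 0 → a = 0 := by decide
          exact this _ hmem h1
        omega
      · have : gN (hN n) = Df (hN n % 7) + 10 * gN (hN n / 7) := by
          rw [gN, Nat.digits_def' (by norm_num : (1:ℕ) < 7) hz]
          simp [Nat.ofDigits_cons, gN]
        rw [this, hrec]
        have hm7 : (DfInv (n % 10) + 7 * hN (n / 10)) % 7 = DfInv (n % 10) := by omega
        have hd7 : (DfInv (n % 10) + 7 * hN (n / 10)) / 7 = hN (n / 10) := by omega
        rw [hm7, hd7, hDDf, hq]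
        omega

-- between two consecutive allowed-digit numbers there is no allowed-digit number
lemma gap (c m : ℕ) (h1 : gN c < m) (h2 : m < gN (c + 1)) : ¬ goodN m := by
  intro hg
  have hk := gN_hN m hg
  rw [← hk] at h1 h2
  have a1 : c < hN m := gN_mono.lt_iff_lt.mp h1
  have a2 : hN m < c + 1 := gN_mono.lt_iff_lt.mp h2
  omega

-- Nat.toDigits (what str(n) prints) agrees with Nat.digits
lemma toDigitsCore_eq (n : ℕ) (hn : n ≠ 0) : ∀ (f : ℕ) (ds : List Char), n < f →
    Nat.toDigitsCore 10 f n ds = ((Nat.digits 10 n).map Nat.digitChar).reverse ++ ds := by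
  induction n using Nat.strong_induction_on with
  | _ n ih =>
    intro f ds hf
    match f, hf with
    | f + 1, hf =>
      rw [Nat.toDigitsCore]
      have hdig : Nat.digits 10 n = n % 10 :: Nat.digits 10 (n / 10) :=
        Nat.digits_def' (by norm_num) (Nat.pos_of_ne_zero hn)
      by_cases hq : n / 10 = 0
      · simp [hq, hdig, Nat.digits_zero]
      · simp only [if_neg hq]
        rw [ih (n / 10) (Nat.div_lt_self (Nat.pos_of_ne_zero hn) (by norm_num)) hq f
          (Nat.digitChar (n % 10) :: ds) (by omega)]
        rw [hdig]
        simp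

lemma toChars_eq (n : ℕ) (hn : n ≠ 0) :
    PySem.Int.toChars (n : Int) = ((Nat.digits 10 n).map Nat.digitChar).reverse := by
  rw [PySem.Int.toChars, if_neg (by omega), Int.toNat_natCast, Nat.toDigits]
  rw [toDigitsCore_eq n hn (n+1) [] (by omega)]
  simp

lemma toList_inj (s t : String) (h : s.toList = t.toList) : s = t := by
  have := congrArg String.ofList h
  rwa [String.ofList_toList, String.ofList_toList] at this

lemma fact1 : ∀ d, d < 10 → PySem.Int.ofChars? [Nat.digitChar d] = some (d : Int) := by decide
lemma fact2 : ∀ d, d < 10 → d ∉ allowedDigits → PySem.List.pyGet? rev2L (d : Int) = some (-1) := by decide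
lemma fact3 : ∀ d, d < 10 → d ∈ allowedDigits →
    PySem.List.pyGet? rev2L (d : Int) = some ((rvN d : ℕ) : Int) ∧ ((rvN d : ℕ) : Int) ≠ -1 ∧
      PySem.Int.toStr ((rvN d : ℕ) : Int) = String.ofList [Nat.digitChar (rvN d)] := by decide

lemma reverseStGo_spec (ds : List ℕ) (hds : ∀ d ∈ ds, d < 10) : ∀ (ret : String),
    reverseStGo (ds.map Nat.digitChar) ret =
      if ∀ d ∈ ds, d ∈ allowedDigits then
        ret ++ String.ofList (ds.map (fun d => Nat.digitChar (rvN d))) else "" := by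
  induction ds with
  | nil => intro ret; simp [reverseStGo]
  | cons d rest ih =>
    intro ret
    have hd : d < 10 := hds d (by simp)
    have hrest : ∀ x ∈ rest, x < 10 := fun x hx => hds x (by simp [hx])
    simp only [List.map_cons, reverseStGo, fact1 d hd]
    by_cases hmem : d ∈ allowedDigits
    · obtain ⟨hg, hne, hstr⟩ := fact3 d hd hmem
      simp only [hg, if_neg hne, ih hrest]
      by_cases hc : ∀ x ∈ rest, x ∈ allowedDigits
      · rw [if_pos hc, if_pos (by simpa [hmem] using hc)]
        rw [hstr]; apply toList_inj; simp
      · rw [if_neg hc, if_neg (by simp only [List.forall_mem_cons]; tauto)]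
    · simp only [fact2 d hd hmem]
      rw [if_pos trivial, if_neg (by simp only [List.forall_mem_cons]; tauto)]

lemma reverseSt_spec (n : ℕ) (hn : n ≠ 0) :
    reverseSt (n : Int) =
      if ∀ d ∈ Nat.digits 10 n, d ∈ allowedDigits then
        String.ofList ((Nat.digits 10 n).map (fun d => Nat.digitChar (rvN d)))
      else "" := by
  rw [reverseSt]
  simp only [PySem.Str.slice?_none_none_neg_one]
  rw [String.toList_ofList, PySem.Int.toList_toStr, toChars_eq n hn, List.reverse_reverse]
  rw [reverseStGo_spec _ (fun d hd => Nat.digits_lt_base (by norm_num) hd)]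
  split <;> simp

lemma loopA (fuel : ℕ) : ∀ (K c cur : ℕ), c < K → gN c ≤ cur → cur < gN (c + 1) →
    gN K ≤ cur + fuel →
    reverse2Go fuel (K : Int) (c : Int) (cur : Int) =
      String.ofList ((Nat.digits 10 (gN K)).map (fun d => Nat.digitChar (rvN d))) := by
  induction fuel with
  | zero =>
    intro K c cur hcK h1 h2 hfuel
    exfalso
    have : gN (c+1) ≤ gN K := gN_mono.monotone (by omega)
    omega
  | succ fuel ih =>
    intro K c cur hcK h1 h2 hfuel
    have hlt : (c : Int) < (K : Int) := by exact_mod_cast hcK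
    rw [reverse2Go, if_pos hlt]
    have hcast : (cur : Int) + 1 = ((cur + 1 : ℕ) : Int) := by push_cast; ring
    rcases Nat.lt_or_ge (cur + 1) (gN (c + 1)) with hc | hc
    · -- cur+1 is not an allowed-digit number: count unchanged
      have hbad : ¬ goodN (cur + 1) := gap c (cur + 1) (by omega) hc
      have hr : reverseSt ((cur : Int) + 1) = "" := by
        rw [hcast, reverseSt_spec (cur + 1) (by omega),
          if_neg (show ¬∀ d ∈ Nat.digits 10 (cur+1), d ∈ allowedDigits from hbad)]
      simp only [hr]
      have hok : okA "" = false := by decide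
      simp only [hok, Bool.false_eq_true, if_false]
      rw [if_neg (by exact_mod_cast Nat.ne_of_lt hcK), hcast]
      exact ih K c (cur + 1) hcK (by omega) hc (by omega)
    · -- cur+1 = gN (c+1): the next allowed-digit number
      have heq : cur + 1 = gN (c + 1) := by omega
      have hgood : goodN (gN (c + 1)) := good_gN _ (by omega)
      have hne : gN (c + 1) ≠ 0 := by have := le_gN (c + 1); omega
      have hr : reverseSt ((cur : Int) + 1) =
          String.ofList ((Nat.digits 10 (gN (c+1))).map (fun d => Nat.digitChar (rvN d))) := by
        rw [hcast, heq, reverseSt_spec _ hne,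
          if_pos (show ∀ d ∈ Nat.digits 10 (gN (c+1)), d ∈ allowedDigits from hgood)]
      have hlen : okA (String.ofList ((Nat.digits 10 (gN (c+1))).map (fun d => Nat.digitChar (rvN d)))) = true := by
        have : Nat.digits 10 (gN (c+1)) ≠ [] := Nat.digits_ne_nil_iff_ne_zero.mpr hne
        simp [okA, PySem.Str.len, String.toList_ofList]
        exact List.length_pos_of_ne_nil this
      simp only [hr, hlen, if_true]
      by_cases hKc : c + 1 = K
      · rw [if_pos (by exact_mod_cast congrArg (Nat.cast : ℕ → Int) hKc), hKc]
      · rw [if_neg (by exact_mod_cast hKc)]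
        have hc1 : (c : Int) + 1 = ((c + 1 : ℕ) : Int) := by push_cast; ring
        rw [hc1, hcast]
        exact ih K (c+1) (cur+1) (by omega) (by omega)
          (by rw [heq]; exact gN_mono (by omega)) (by omega)

lemma fmod_cast (K : ℕ) : PySem.Int.mod (K : Int) 7 = ((K % 7 : ℕ) : Int) := by
  simp [PySem.Int.mod, Int.fmod_eq_emod]

lemma fdiv_cast (K : ℕ) : PySem.Int.floordiv (K : Int) 7 = ((K / 7 : ℕ) : Int) := by
  simp [PySem.Int.floordiv, Int.fdiv_eq_ediv]

lemma pyGet_pvMapB : ∀ d, d < 7 → PySem.Str.pyGet? pvMapB ((d : ℕ) : Int) = some (Nat.digitChar (Mf d)) := by decide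

lemma altGo_spec (K : ℕ) :
    reverse2AltGo (K : Int) = (Nat.digits 7 K).map (fun d => String.ofList [Nat.digitChar (Mf d)]) := by
  induction K using Nat.strong_induction_on with
  | _ K ih =>
    rcases Nat.eq_zero_or_pos K with h | h
    · subst h; rw [reverse2AltGo]; simp
    · rw [reverse2AltGo, if_pos (by exact_mod_cast h : (0:Int) < (K:Int))]
      rw [fmod_cast, fdiv_cast, pyGet_pvMapB _ (Nat.mod_lt _ (by norm_num))]
      rw [ih (K / 7) (Nat.div_lt_self h (by norm_num))]
      rw [Nat.digits_def' (by norm_num : (1:ℕ) < 7) h]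
      simp

lemma alt_spec (K : ℕ) :
    reverse2_alt (K : Int) = String.ofList ((Nat.digits 7 K).map (fun d => Nat.digitChar (Mf d))) := by
  rw [reverse2_alt, altGo_spec]
  apply toList_inj
  rw [PySem.Str.toList_join, String.toList_ofList]
  have hmm : List.map String.toList ((Nat.digits 7 K).map (fun d => String.ofList [Nat.digitChar (Mf d)]))
      = List.map (fun c => [c]) ((Nat.digits 7 K).map (fun d => Nat.digitChar (Mf d))) := by
    simp [Function.comp]
  rw [hmm]
  have := PySem.Chars.join_nil_singletons ((Nat.digits 7 K).map (fun d => Nat.digitChar (Mf d)))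
  simpa using this

lemma alt_nonpos (k : Int) (hk : k ≤ 0) : reverse2_alt k = "" := by
  rw [reverse2_alt, reverse2AltGo, if_neg (by omega)]
  apply toList_inj
  rw [PySem.Str.toList_join]
  simp [PySem.Chars.join, List.intercalate]

lemma gN_le_fuel (K : ℕ) (hK : K ≤ 2147483648) : gN K ≤ 1000000000000 := by
  rcases Nat.eq_zero_or_pos K with h | h
  · simp [h, gN_zero]
  · have hlen : (Nat.digits 7 K).length ≤ 12 := by
      by_contra hcon
      have h13 : (7:ℕ) ^ 13 ≤ 7 ^ (Nat.digits 7 K).length :=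
        Nat.pow_le_pow_right (by norm_num) (by omega)
      have := Nat.base_pow_length_digits_le 7 K (by norm_num) (by omega)
      omega
    have hlt : gN K < 10 ^ (Nat.digits 7 K).length := by
      have := Nat.ofDigits_lt_base_pow_length (b := 10) (l := (Nat.digits 7 K).map Df)
        (by norm_num)
        (by
          intro x hx
          obtain ⟨d, hd, rfl⟩ := List.mem_map.mp hx
          have : d < 7 := Nat.digits_lt_base (by norm_num) hd
          interval_cases d <;> decide)
      simpa [gN] using this
    have : (10:ℕ) ^ (Nat.digits 7 K).length ≤ 10 ^ 12 :=
      Nat.pow_le_pow_right (by norm_num) hlen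
    omega

-- ===== VERDICT (by name: the statement is the Claim_ definition above) =====
theorem reverse2_spec : Claim_equal_reverse2 := by
  unfold Claim_equal_reverse2 Spec_reverse2
  intro k hdom
  by_cases hk : k ≤ 0
  · rw [alt_nonpos k hk, reverse2,
      show (1000000000000:ℕ) = 999999999999+1 from rfl, reverse2Go, if_neg (by omega)]
  · replace hk : 0 < k := by omega
    have hdomK : k ≤ 2147483648 := by
      unfold Dom_reverse2 pvDomInt at hdom
      simpa using (of_decide_eq_true hdom).2
    have hK : k = ((k.toNat : ℕ) : Int) := by omega
    rw [hK, alt_spec, reverse2]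
    have h0 : ((0:ℕ) : Int) = (0 : Int) := by norm_num
    rw [← h0]
    rw [loopA 1000000000000 k.toNat 0 0 (by omega) (by simp [gN_zero]) (by decide)
      (by simpa using gN_le_fuel k.toNat (by omega))]
    rw [digits_gN k.toNat (by omega), List.map_map]
    apply congrArg
    apply List.map_congr_left
    intro d hd
    have hd7 : d < 7 := Nat.digits_lt_base (by norm_num) hd
    have : ∀ e, e < 7 → rvN (Df e) = Mf e := by decide
    simp [Function.comp, this d hd7]
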